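-- pv_equiv track=rewrite | github.com/tomwolfe/DRIFT | drift/metabolic.py | fuzzy_match_reaction_id
-- ===== SOURCE A (Python) =====
-- from typing import List, Dict, Any, Union, Optional, Callable
--
-- def fuzzy_match_reaction_id(query_id: str, model_reaction_ids: List[str]) -> Optional[str]:
--     """
--     Attempts to find a matching reaction ID in the model using common variations.
--     Handles 'EX_' prefixes, case sensitivity, and double underscores.
--     """
--     if query_id in model_reaction_ids:
--         return query_id
--
--     # Try case-insensitive
--     lower_ids = {rid.lower(): rid for rid in model_reaction_ids}
--     if query_id.lower() in lower_ids:
--         return lower_ids[query_id.lower()]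
--
--     # Try adding/removing 'EX_' prefix
--     variations = []
--     if query_id.startswith("EX_"):
--         variations.append(query_id[3:])
--     else:
--         variations.append(f"EX_{query_id}")
--
--     # Try replacing double underscores with single or vice-versa
--     if "__" in query_id:
--         variations.append(query_id.replace("__", "_"))
--     else:
--         # This is risky but sometimes helpful
--         pass
--
--     for var in variations:
--         if var in model_reaction_ids:
--             return var
--         if var.lower() in lower_ids:
--             return lower_ids[var.lower()]
--
--     return None
-- ===== SOURCE B (Python) =====
-- from typing import List, Optional
--
-- def fuzzy_match_reaction_id(query_id: str, model_reaction_ids: List[str]) -> Optional[str]: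
--     """Rank every model reaction ID by how well it matches the query (exact beats
--     case-insensitive, earlier ID variation beats later), then return the best-ranked one."""
--     candidates = [query_id,
--                   query_id[3:] if query_id.startswith("EX_") else "EX_" + query_id]
--     if "__" in query_id:
--         candidates.append(query_id.replace("__", "_"))
--     pairs = [(c, c.lower()) for c in candidates]
--
--     best = {}
--     for rid in model_reaction_ids:
--         rid_l = rid.lower()
--         for i, (cand, cand_l) in enumerate(pairs):
--             if rid == cand:
--                 best[2 * i] = rid
--             elif rid_l == cand_l:
--                 best[2 * i + 1] = rid
--     return best[min(best)] if best else None
-- ===== Notes on version B (the rewrite author's own statement) =====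
-- stated objective: alternative
-- what changed: B replaces A's sequence of staged membership/dict lookups by a rank-and-select pass: it assigns every model id a numeric match rank (exact beats case-insensitive, earlier variation beats later) in one scan over the model list and returns the id holding the best rank.
import Mathlib
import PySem

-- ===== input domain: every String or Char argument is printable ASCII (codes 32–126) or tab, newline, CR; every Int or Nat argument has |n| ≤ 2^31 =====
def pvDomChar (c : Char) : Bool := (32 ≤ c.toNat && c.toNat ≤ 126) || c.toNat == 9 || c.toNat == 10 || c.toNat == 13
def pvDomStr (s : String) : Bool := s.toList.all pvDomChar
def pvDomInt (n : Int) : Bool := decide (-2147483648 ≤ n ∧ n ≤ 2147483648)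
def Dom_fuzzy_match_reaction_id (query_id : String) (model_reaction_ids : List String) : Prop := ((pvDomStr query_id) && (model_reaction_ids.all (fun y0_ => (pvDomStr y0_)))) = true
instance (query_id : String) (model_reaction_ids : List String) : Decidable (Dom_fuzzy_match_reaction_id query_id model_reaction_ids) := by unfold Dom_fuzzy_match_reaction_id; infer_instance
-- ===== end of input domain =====

-- B replaces A's staged lookups by a rank-and-select pass over the model ids (objective: alternative).

-- ===== PORT A =====
-- A's for-loop over `variations`: exact membership, then lookup in the lowercase dict.
def fzLoopA (model_reaction_ids : List String) (lower_ids : PySem.Dict String String) : List String → Option String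
  | [] => none
  | var :: rest =>
    if model_reaction_ids.contains var then some var
    else match lower_ids.get? (PySem.Str.lower var) with
      | some v => some v
      | none => fzLoopA model_reaction_ids lower_ids rest

def fuzzy_match_reaction_id (query_id : String) (model_reaction_ids : List String) : Option String :=
  if model_reaction_ids.contains query_id then some query_id
  else
    -- lower_ids = {rid.lower(): rid for rid in model_reaction_ids}
    let lower_ids : PySem.Dict String String :=
      model_reaction_ids.foldl (fun d rid => d.insert (PySem.Str.lower rid) rid) PySem.Dict.empty
    match lower_ids.get? (PySem.Str.lower query_id) with
    | some v => some v
    | none =>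
      let variations : List String :=
        (if PySem.Str.startswith query_id "EX_" then [PySem.Str.slice query_id (some 3) none]
         else ["EX_" ++ query_id]) ++
        (if PySem.Str.isIn "__" query_id then [PySem.Str.replace query_id "__" "_"] else [])
      fzLoopA model_reaction_ids lower_ids variations

-- ===== PORT B =====
-- body of B's inner `for i, (cand, cand_l) in enumerate(pairs)` loop
def fzStepB (rid rid_l : String) (b : PySem.Dict Int String) (ic : Int × (String × String)) : PySem.Dict Int String :=
  if rid == ic.2.1 then b.insert (2 * ic.1) rid
  else if rid_l == ic.2.2 then b.insert (2 * ic.1 + 1) rid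
  else b

def fuzzy_match_reaction_id_alt (query_id : String) (model_reaction_ids : List String) : Option String :=
  let candidates : List String :=
    [query_id,
     if PySem.Str.startswith query_id "EX_" then PySem.Str.slice query_id (some 3) none
     else "EX_" ++ query_id] ++
    (if PySem.Str.isIn "__" query_id then [PySem.Str.replace query_id "__" "_"] else [])
  let pairs : List (String × String) := candidates.map (fun c => (c, PySem.Str.lower c))
  let best : PySem.Dict Int String :=
    model_reaction_ids.foldl
      (fun b rid => (PySem.List.enumerate pairs 0).foldl (fzStepB rid (PySem.Str.lower rid)) b)
      PySem.Dict.empty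
  -- `best[min(best)] if best else None`: empty dict yields the None branch
  match PySem.List.min? best.keys (fun k => k) with
  | some k => best.get? k
  | none => none

-- ===== PRECONDITION & SPEC =====
def Spec_fuzzy_match_reaction_id (query_id : String) (model_reaction_ids : List String) (out : Option String) : Prop := out = fuzzy_match_reaction_id_alt query_id model_reaction_ids
instance (query_id : String) (model_reaction_ids : List String) (out : Option String) : Decidable (Spec_fuzzy_match_reaction_id query_id model_reaction_ids out) := by unfold Spec_fuzzy_match_reaction_id; infer_instance

-- ===== CLAIM (what is proved, stated in full; the proofs are below) =====
def Claim_equal_fuzzy_match_reaction_id : Prop := ∀ (query_id : String) (model_reaction_ids : List String), Dom_fuzzy_match_reaction_id query_id model_reaction_ids → Spec_fuzzy_match_reaction_id query_id model_reaction_ids (fuzzy_match_reaction_id query_id model_reaction_ids)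

-- ===== LEMMAS AND PROOFS =====

-- proof-side uncurried form of B's inner-loop body (over a plain enumerated candidate list)
def fzStepP (rid : String) (b : PySem.Dict Int String) (ic : Int × String) : PySem.Dict Int String :=
  if rid == ic.2 then b.insert (2 * ic.1) rid
  else if PySem.Str.lower rid == PySem.Str.lower ic.2 then b.insert (2 * ic.1 + 1) rid
  else b

-- fzHit l rid k : rid would be written at key k by B's inner loop over l
def fzHit (l : List (Int × String)) (rid : String) (k : Int) : Bool :=
  match l with
  | [] => false
  | ic :: t =>
    ((rid == ic.2 && k == 2 * ic.1) ||
     (!(rid == ic.2) && (PySem.Str.lower rid == PySem.Str.lower ic.2) && k == 2 * ic.1 + 1)) ||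
    fzHit t rid k

-- the value B's dict holds at key k (last writer wins = last match in the model list)
def fzF (m : List String) (l : List (Int × String)) (k : Int) : Option String :=
  m.reverse.find? (fun rid => fzHit l rid k)

-- common staged form: exact match first, then last case-insensitive (non-exact) match
def fzStages (m : List String) : List String → Option String
  | [] => none
  | c :: rest =>
    if m.contains c then some c
    else match m.reverse.find? (fun rid => !(rid == c) && (PySem.Str.lower rid == PySem.Str.lower c)) with
      | some rid => some rid
      | none => fzStages m rest

theorem fz_if_append {α : Type} (b : Bool) (x y : α) (l : List α) :
    (if b = true then [x] else [y]) ++ l = (if b = true then x else y) :: l := by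
  cases b <;> rfl

theorem fz_find?_congr {α : Type} (p q : α → Bool) (l : List α) (h : ∀ x ∈ l, p x = q x) :
    l.find? p = l.find? q := by
  induction l with
  | nil => rfl
  | cons x t ih =>
    have hx := h x (List.mem_cons_self ..)
    by_cases hq : q x = true
    · rw [List.find?_cons_of_pos (hx ▸ hq), List.find?_cons_of_pos hq]
    · rw [List.find?_cons_of_neg (by simp [hx, Bool.not_eq_true] at hq ⊢; exact hq),
          List.find?_cons_of_neg (by simpa using hq),
          ih (fun y hy => h y (List.mem_cons_of_mem _ hy))]

theorem fz_inner_get (rid : String) (l : List (Int × String)) (b : PySem.Dict Int String) (k : Int) :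
    (l.foldl (fzStepP rid) b).get? k = if fzHit l rid k then some rid else b.get? k := by
  induction l generalizing b with
  | nil => simp [fzHit]
  | cons ic t ih =>
    rw [List.foldl_cons, ih]
    by_cases ht : fzHit t rid k = true
    · simp [fzHit, ht]
    · simp only [fzHit, Bool.or_eq_true, ht]
      unfold fzStepP
      by_cases h1 : rid == ic.2
      · simp [h1, PySem.Dict.get?_insert, beq_iff_eq]
      · by_cases h2 : PySem.Str.lower rid == PySem.Str.lower ic.2
        · simp [h1, h2, PySem.Dict.get?_insert, beq_iff_eq]
        · simp [h1, h2]

theorem fz_outer_get (l : List (Int × String)) (m : List String) (b : PySem.Dict Int String) (k : Int) :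
    ((m.foldl (fun b rid => l.foldl (fzStepP rid) b) b).get? k)
      = (m.reverse.find? (fun rid => fzHit l rid k)).or (b.get? k) := by
  induction m generalizing b with
  | nil => simp
  | cons r t ih =>
    simp only [List.foldl_cons, List.reverse_cons, List.find?_append, ih, fz_inner_get]
    by_cases h : fzHit l r k = true
    · simp [List.find?, h]
    · simp [List.find?, h]

theorem fz_hit_lb (cs : List String) (s : Int) (rid : String) (k : Int)
    (h : fzHit (PySem.List.enumerate cs s) rid k = true) : 2 * s ≤ k := by
  induction cs generalizing s with
  | nil => simp [PySem.List.enumerate_nil, fzHit] at h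
  | cons c t ih =>
    rw [PySem.List.enumerate_cons] at h
    simp only [fzHit, Bool.or_eq_true, Bool.and_eq_true, beq_iff_eq] at h
    rcases h with (⟨_, hk⟩ | ⟨_, _, hk⟩) | h
    · omega
    · omega
    · have := ih (s + 1) h; omega

theorem fz_min_eq (l : List Int) (k : Int) (h1 : k ∈ l) (h2 : ∀ j ∈ l, k ≤ j) :
    PySem.List.min? l (fun x => x) = some k := by
  cases hm : PySem.List.min? l (fun x => x) with
  | none =>
    rw [PySem.List.min?_eq_none_iff] at hm
    subst hm; simp at h1
  | some m =>
    have hmem := PySem.List.min?_mem hm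
    have hmin := PySem.List.min?_isMin hm k h1
    have := h2 m hmem
    have : m = k := by omega
    rw [this]

-- head-stage characterisations of fzHit on an enumerate list
theorem fz_hit_even (c : String) (t : List String) (s : Int) (rid : String) :
    fzHit (PySem.List.enumerate (c :: t) s) rid (2 * s) = (rid == c) := by
  rw [PySem.List.enumerate_cons]
  have ht : fzHit (PySem.List.enumerate t (s + 1)) rid (2 * s) = false := by
    by_contra h
    have := fz_hit_lb t (s + 1) rid (2 * s) (by simpa using h)
    omega
  have h2 : ((2 * s : Int) == 2 * s + 1) = false := by simp
  simp [fzHit, ht, h2]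

theorem fz_hit_odd (c : String) (t : List String) (s : Int) (rid : String) :
    fzHit (PySem.List.enumerate (c :: t) s) rid (2 * s + 1)
      = (!(rid == c) && (PySem.Str.lower rid == PySem.Str.lower c)) := by
  rw [PySem.List.enumerate_cons]
  have ht : fzHit (PySem.List.enumerate t (s + 1)) rid (2 * s + 1) = false := by
    by_contra h
    have := fz_hit_lb t (s + 1) rid (2 * s + 1) (by simpa using h)
    omega
  have h2 : ((2 * s + 1 : Int) == 2 * s) = false := by simp
  simp [fzHit, ht, h2]

theorem fz_hit_tail (c : String) (t : List String) (s : Int) (rid : String) (k : Int)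
    (h1 : k ≠ 2 * s) (h2 : k ≠ 2 * s + 1) :
    fzHit (PySem.List.enumerate (c :: t) s) rid k = fzHit (PySem.List.enumerate t (s + 1)) rid k := by
  rw [PySem.List.enumerate_cons]
  have e1 : (k == 2 * s) = false := by simpa using h1
  have e2 : (k == 2 * s + 1) = false := by simpa using h2
  simp [fzHit, e1, e2]

theorem fz_contains_iff (m : List String) (c : String) :
    m.contains c = true ↔ (m.reverse.find? (fun rid => rid == c)) ≠ none := by
  rw [Ne, List.find?_eq_none]
  simp

-- under ¬contains, the even stage of fzF is empty
theorem fz_even_none (m : List String) (c : String) (t : List String) (s : Int)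
    (hc : ¬ m.contains c = true) :
    fzF m (PySem.List.enumerate (c :: t) s) (2 * s) = none := by
  unfold fzF
  rw [fz_find?_congr _ _ _ (fun x _ => fz_hit_even c t s x)]
  by_contra h
  exact hc ((fz_contains_iff m c).mpr h)

-- the tail contributes nothing at keys below 2*(s+1)
theorem fz_tail_none (m : List String) (t : List String) (s : Int) (k : Int) (hk : k < 2 * (s + 1)) :
    fzF m (PySem.List.enumerate t (s + 1)) k = none := by
  unfold fzF
  apply List.find?_eq_none.mpr
  intro x _ hx
  have := fz_hit_lb t (s + 1) x k hx
  omega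

-- any key of the rank dict built from (enumerate cs s) is ≥ 2*s
theorem fz_key_lb (m : List String) (cs : List String) (s : Int) (k : Int)
    (h : fzF m (PySem.List.enumerate cs s) k ≠ none) : 2 * s ≤ k := by
  obtain ⟨rid, hr⟩ := Option.ne_none_iff_exists'.mp h
  exact fz_hit_lb cs s rid k (by simpa using List.find?_some hr)

-- the main staged-selection lemma: taking the best rank equals the staged scan
theorem fz_stage_ind (m : List String) (cs : List String) (s : Int) (hs : 0 ≤ s)
    (ks : List Int) (hks : ∀ k, k ∈ ks ↔ fzF m (PySem.List.enumerate cs s) k ≠ none) :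
    (match PySem.List.min? ks (fun x => x) with
     | some k => fzF m (PySem.List.enumerate cs s) k
     | none => none) = fzStages m cs := by
  induction cs generalizing s ks with
  | nil =>
    have hko : ks = [] := by
      apply List.eq_nil_iff_forall_not_mem.mpr
      intro k hk
      apply (hks k).mp hk
      unfold fzF
      rw [PySem.List.enumerate_nil]
      exact List.find?_eq_none.mpr (fun x _ => by simp [fzHit])
    subst hko
    have hm0 : PySem.List.min? ([] : List Int) (fun x => x) = none := by
      rw [PySem.List.min?_eq_none_iff]
    rw [hm0]
    rfl
  | cons c t ih =>
    by_cases hc : m.contains c = true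
    · -- exact match at this stage
      have hcm : c ∈ m := by simpa using hc
      have hfind : fzF m (PySem.List.enumerate (c :: t) s) (2 * s)
          = m.reverse.find? (fun rid => rid == c) := by
        unfold fzF
        exact fz_find?_congr _ _ _ (fun x _ => fz_hit_even c t s x)
      have hne : fzF m (PySem.List.enumerate (c :: t) s) (2 * s) ≠ none := by
        rw [hfind]; exact (fz_contains_iff m c).mp hc
      have hlb : ∀ j ∈ ks, 2 * s ≤ j := fun j hj => fz_key_lb m _ s j ((hks j).mp hj)
      rw [fz_min_eq ks (2 * s) ((hks _).mpr hne) hlb]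
      show fzF m (PySem.List.enumerate (c :: t) s) (2 * s) = fzStages m (c :: t)
      rw [hfind] at hne ⊢
      cases hfs : m.reverse.find? (fun rid => rid == c) with
      | none => exact absurd hfs hne
      | some v =>
        have hv := List.find?_some hfs
        simp [fzStages, hcm, beq_iff_eq.mp hv]
    · have hcm : c ∉ m := by simpa using hc
      by_cases ho : fzF m (PySem.List.enumerate (c :: t) s) (2 * s + 1) ≠ none
      · -- case-insensitive match at this stage
        have hfind : fzF m (PySem.List.enumerate (c :: t) s) (2 * s + 1)
            = m.reverse.find? (fun rid => !(rid == c) && (PySem.Str.lower rid == PySem.Str.lower c)) := by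
          unfold fzF
          exact fz_find?_congr _ _ _ (fun x _ => fz_hit_odd c t s x)
        have hnot0 : (2 * s) ∉ ks := fun h =>
          ((hks _).mp h) (fz_even_none m c t s hc)
        have hlb : ∀ j ∈ ks, 2 * s + 1 ≤ j := by
          intro j hj
          have h1 := fz_key_lb m _ s j ((hks j).mp hj)
          have h2 : j ≠ 2 * s := fun e => hnot0 (e ▸ hj)
          omega
        rw [fz_min_eq ks (2 * s + 1) ((hks _).mpr ho) hlb]
        show fzF m (PySem.List.enumerate (c :: t) s) (2 * s + 1) = fzStages m (c :: t)
        rw [hfind] at ho ⊢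
        cases hfs : m.reverse.find? (fun rid => !(rid == c) && (PySem.Str.lower rid == PySem.Str.lower c)) with
        | none => exact absurd hfs ho
        | some v => simp [fzStages, hcm, hfs]
      · -- no match at this stage: recurse into the tail
        rw [not_not] at ho
        have hF : ∀ k, fzF m (PySem.List.enumerate (c :: t) s) k
            = fzF m (PySem.List.enumerate t (s + 1)) k := by
          intro k
          by_cases h0 : k = 2 * s
          · subst h0
            rw [fz_even_none m c t s hc, fz_tail_none m t s _ (by omega)]
          · by_cases h1 : k = 2 * s + 1
            · subst h1
              rw [ho, fz_tail_none m t s _ (by omega)]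
            · unfold fzF
              exact fz_find?_congr _ _ _ (fun x _ => fz_hit_tail c t s x k h0 h1)
        have hks' : ∀ k, k ∈ ks ↔ fzF m (PySem.List.enumerate t (s + 1)) k ≠ none :=
          fun k => (hks k).trans (by rw [hF])
        have hrec := ih (s + 1) (by omega) ks hks'
        have hstage : fzStages m (c :: t) = fzStages m t := by
          have hn : m.reverse.find? (fun rid => !(rid == c) && (PySem.Str.lower rid == PySem.Str.lower c)) = none := by
            have := ho
            unfold fzF at this
            rwa [fz_find?_congr _ _ _ (fun x _ => fz_hit_odd c t s x)] at this
          simp [fzStages, hcm, hn]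
        rw [hstage, ← hrec]
        cases PySem.List.min? ks (fun x => x) with
        | none => rfl
        | some k => exact hF k

-- A's fold-built lowercase dict looked up at key k is the last rid lowering to k
theorem fz_dict_lookup (xs : List String) (k : String) (d : PySem.Dict String String) :
    (xs.foldl (fun d rid => d.insert (PySem.Str.lower rid) rid) d).get? k =
      ((xs.reverse.find? (fun rid => PySem.Str.lower rid == k)).or (d.get? k)) := by
  induction xs generalizing d with
  | nil => simp
  | cons x t ih =>
    simp only [List.foldl_cons, List.reverse_cons, List.find?_append, ih, Option.or_assoc]
    congr 1
    simp only [List.find?]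
    rw [PySem.Dict.get?_insert]
    by_cases h : PySem.Str.lower x == k
    · simp [eq_of_beq h]
    · have hk : ¬ k = PySem.Str.lower x := fun e => absurd (beq_iff_eq.mpr e.symm) (by simpa using h)
      simp [h, hk]

-- under ¬contains, A's dict lookup for lower(c) equals the staged predicate scan
theorem fz_lookup_stage (m : List String) (c : String) (hc : ¬ m.contains c = true) :
    (m.foldl (fun d rid => d.insert (PySem.Str.lower rid) rid) PySem.Dict.empty).get? (PySem.Str.lower c)
      = m.reverse.find? (fun rid => !(rid == c) && (PySem.Str.lower rid == PySem.Str.lower c)) := by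
  rw [fz_dict_lookup]
  rw [PySem.Dict.get?_empty, Option.or_none]
  apply fz_find?_congr
  intro x hx
  have hxm : x ∈ m := List.mem_reverse.mp hx
  have hxc : (x == c) = false := by
    cases hxeq : x == c
    · rfl
    · have hx : x = c := beq_iff_eq.mp hxeq
      subst hx
      exact absurd (by simpa using hxm) hc
  simp [hxc]

theorem fz_loopA_eq (m : List String) (vars : List String) :
    fzLoopA m (m.foldl (fun d rid => d.insert (PySem.Str.lower rid) rid) PySem.Dict.empty) vars
      = fzStages m vars := by
  induction vars with
  | nil => rfl
  | cons c rest ih =>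
    unfold fzLoopA fzStages
    by_cases hc : m.contains c = true
    · simp only [hc, if_true]
    · simp only [hc]
      rw [fz_lookup_stage m c hc]
      cases m.reverse.find? (fun rid => !(rid == c) && (PySem.Str.lower rid == PySem.Str.lower c)) with
      | none => exact ih
      | some v => rfl

theorem fz_A_eq_stages (q : String) (m : List String) :
    fuzzy_match_reaction_id q m
      = fzStages m (q ::
          (if PySem.Str.startswith q "EX_" then PySem.Str.slice q (some 3) none else "EX_" ++ q) ::
          (if PySem.Str.isIn "__" q then [PySem.Str.replace q "__" "_"] else [])) := by
  unfold fuzzy_match_reaction_id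
  rw [fz_if_append]
  unfold fzStages
  by_cases hq : m.contains q = true
  · simp only [hq, if_true]
  · simp only [hq]
    rw [fz_lookup_stage m q hq]
    cases m.reverse.find? (fun rid => !(rid == q) && (PySem.Str.lower rid == PySem.Str.lower q)) with
    | none => exact fz_loopA_eq m _
    | some v => rfl

-- B's fold over the enumerated (candidate, lowered) pairs is the plain-candidate fold
theorem fz_enum_map (cs : List String) (s : Int) (rid : String) (b : PySem.Dict Int String) :
    (PySem.List.enumerate (cs.map (fun c => (c, PySem.Str.lower c))) s).foldl
        (fzStepB rid (PySem.Str.lower rid)) b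
      = (PySem.List.enumerate cs s).foldl (fzStepP rid) b := by
  induction cs generalizing s b with
  | nil => rfl
  | cons c t ih =>
    rw [List.map_cons, PySem.List.enumerate_cons, PySem.List.enumerate_cons,
        List.foldl_cons, List.foldl_cons, ih]
    rfl

theorem fz_B_eq_stages (q : String) (m : List String) :
    fuzzy_match_reaction_id_alt q m
      = fzStages m
          ([q, if PySem.Str.startswith q "EX_" then PySem.Str.slice q (some 3) none else "EX_" ++ q] ++
           (if PySem.Str.isIn "__" q then [PySem.Str.replace q "__" "_"] else [])) := by
  have h : fuzzy_match_reaction_id_alt q m =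
      (match PySem.List.min?
          (m.foldl
            (fun b rid => (PySem.List.enumerate
              (([q, if PySem.Str.startswith q "EX_" then PySem.Str.slice q (some 3) none else "EX_" ++ q] ++
               (if PySem.Str.isIn "__" q then [PySem.Str.replace q "__" "_"] else [])).map
                 (fun c => (c, PySem.Str.lower c))) 0).foldl (fzStepB rid (PySem.Str.lower rid)) b)
            PySem.Dict.empty).keys (fun k => k) with
       | some k =>
          (m.foldl
            (fun b rid => (PySem.List.enumerate
              (([q, if PySem.Str.startswith q "EX_" then PySem.Str.slice q (some 3) none else "EX_" ++ q] ++
               (if PySem.Str.isIn "__" q then [PySem.Str.replace q "__" "_"] else [])).map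
                 (fun c => (c, PySem.Str.lower c))) 0).foldl (fzStepB rid (PySem.Str.lower rid)) b)
            PySem.Dict.empty).get? k
       | none => none) := rfl
  rw [h]
  set cands : List String :=
    [q, if PySem.Str.startswith q "EX_" then PySem.Str.slice q (some 3) none else "EX_" ++ q] ++
      (if PySem.Str.isIn "__" q then [PySem.Str.replace q "__" "_"] else []) with hcands
  have hfold :
      (m.foldl
        (fun b rid => (PySem.List.enumerate (cands.map (fun c => (c, PySem.Str.lower c))) 0).foldl
          (fzStepB rid (PySem.Str.lower rid)) b) PySem.Dict.empty)
      = m.foldl (fun b rid => (PySem.List.enumerate cands 0).foldl (fzStepP rid) b) PySem.Dict.empty := by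
    apply congrArg (fun f => List.foldl f PySem.Dict.empty m)
    funext b rid
    exact fz_enum_map cands 0 rid b
  rw [hfold]
  set best : PySem.Dict Int String :=
    m.foldl (fun b rid => (PySem.List.enumerate cands 0).foldl (fzStepP rid) b) PySem.Dict.empty with hbest
  have hget : ∀ k, best.get? k = fzF m (PySem.List.enumerate cands 0) k := by
    intro k
    rw [hbest, fz_outer_get, PySem.Dict.get?_empty, Option.or_none]
    rfl
  have hks : ∀ k, k ∈ best.keys ↔ fzF m (PySem.List.enumerate cands 0) k ≠ none := by
    intro k
    rw [← PySem.Dict.contains_iff_mem_keys, PySem.Dict.contains_eq_isSome_get?, hget]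
    cases fzF m (PySem.List.enumerate cands 0) k <;> simp
  rw [← fz_stage_ind m cands 0 (by omega) best.keys hks]
  cases PySem.List.min? best.keys (fun x => x) with
  | none => rfl
  | some k => exact hget k

-- ===== VERDICT (by name: the statement is the Claim_ definition above) =====
theorem fuzzy_match_reaction_id_spec : Claim_equal_fuzzy_match_reaction_id := by
  intro q m _
  show fuzzy_match_reaction_id q m = fuzzy_match_reaction_id_alt q m
  rw [fz_B_eq_stages q m, fz_A_eq_stages q m]
  rfl
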